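-- pv_equiv track=rewrite | github.com/notem/reWeFDE | info_leakage/preprocess/features/Ngram.py | NgramExtract
-- ===== SOURCE A (Python) =====
-- def NgramLocator(sample, Ng):
--     # locate which gram in NgramExtract
--     index = 0
--     for i in range(0, Ng):
--         if sample[i] == 1:
--             bit = 1
--         else:
--             bit = 0
--         index = index + bit * (2 ** (Ng - i - 1))
--     return index
--
-- def NgramExtract(sizes, NGRAM):
--     # n-gram feature for ordering
--     counter = 0
--     buckets = [0] * (2 ** NGRAM)
--     for i in range(0, len(sizes) - NGRAM + 1):
--         index = NgramLocator(sizes[i:i + NGRAM], NGRAM)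
--         buckets[index] = buckets[index] + 1
--         counter = counter + 1
--     return buckets
-- ===== SOURCE B (Python) =====
-- def NgramExtract(sizes, NGRAM):
--     # sliding-window: update the window index incrementally (shift + mod) instead of
--     # recomputing each window's index from scratch
--     size = 2 ** NGRAM
--     buckets = [0] * size
--     n = len(sizes)
--     if n < NGRAM:
--         return buckets
--     idx = 0
--     for j in range(NGRAM):
--         idx = idx * 2 + (1 if sizes[j] == 1 else 0)
--     buckets[idx] += 1
--     for j in range(NGRAM, n):
--         idx = (idx * 2 + (1 if sizes[j] == 1 else 0)) % size
--         buckets[idx] += 1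
--     return buckets
-- ===== Notes on version B (the rewrite author's own statement) =====
-- stated objective: faster
-- what changed: Instead of recomputing each window's index from scratch with NgramLocator (a fresh slice plus a power-of-two sum per window), B keeps one running window index and updates it per element by shift-in-the-new-bit and mod 2**NGRAM, in a single pass.
import Mathlib
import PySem

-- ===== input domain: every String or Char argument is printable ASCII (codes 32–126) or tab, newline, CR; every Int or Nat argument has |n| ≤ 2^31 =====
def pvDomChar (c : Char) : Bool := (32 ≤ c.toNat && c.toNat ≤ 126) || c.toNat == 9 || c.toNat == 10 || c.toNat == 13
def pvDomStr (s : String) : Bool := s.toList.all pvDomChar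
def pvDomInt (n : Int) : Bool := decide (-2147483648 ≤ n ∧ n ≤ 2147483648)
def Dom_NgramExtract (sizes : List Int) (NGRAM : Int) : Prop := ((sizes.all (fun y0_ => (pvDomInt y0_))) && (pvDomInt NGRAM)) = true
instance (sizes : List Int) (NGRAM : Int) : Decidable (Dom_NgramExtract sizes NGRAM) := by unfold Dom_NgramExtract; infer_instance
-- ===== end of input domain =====

-- B replaces A's per-window index recomputation (NgramLocator over each fresh slice) by a
-- single sliding pass that updates the window index incrementally (shift, add bit, mod).

-- `buckets[index] = buckets[index] + 1` (index always in range here); shared by both ports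
def pvBump (buckets : List Int) (v : Int) : List Int :=
  buckets.set v.toNat (buckets.getD v.toNat 0 + 1)

-- ===== PORT A =====
def NgramLocator (sample : List Int) (Ng : Int) : Int :=
  (PySem.List.pyRange 0 Ng 1).foldl
    (fun index i =>
      let bit : Int := if PySem.List.pyGetD sample i 0 = 1 then 1 else 0
      index + bit * 2 ^ (Ng - i - 1).toNat)
    0

def NgramExtract (sizes : List Int) (NGRAM : Int) : List Int :=
  let buckets : List Int := List.replicate ((2:Nat) ^ NGRAM.toNat) 0
  ((PySem.List.pyRange 0 ((sizes.length : Int) - NGRAM + 1) 1).foldl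
    (fun (st : Int × List Int) i =>
      let index := NgramLocator (PySem.List.slice sizes (some i) (some (i + NGRAM))) NGRAM
      (st.1 + 1, pvBump st.2 index))
    (0, buckets)).2

-- ===== PORT B =====
def NgramExtract_alt (sizes : List Int) (NGRAM : Int) : List Int :=
  let size : Int := 2 ^ NGRAM.toNat
  let buckets : List Int := List.replicate ((2:Nat) ^ NGRAM.toNat) 0
  let n : Int := sizes.length
  if n < NGRAM then buckets
  else
    let idx : Int := (PySem.List.pyRange 0 NGRAM 1).foldl
      (fun idx j => idx * 2 + (if PySem.List.pyGetD sizes j 0 = 1 then 1 else 0)) 0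
    let buckets := pvBump buckets idx
    ((PySem.List.pyRange NGRAM n 1).foldl
      (fun (st : Int × List Int) j =>
        let idx := PySem.Int.mod (st.1 * 2 + (if PySem.List.pyGetD sizes j 0 = 1 then 1 else 0)) size
        (idx, pvBump st.2 idx))
      (idx, buckets)).2

-- ===== PRECONDITION & SPEC =====
-- A's `[0] * (2 ** NGRAM)` raises: TypeError for NGRAM < 0 (2 ** NGRAM is then a float) and
-- MemoryError for NGRAM ≥ 32 (the bucket list would exceed 2^31 elements); B performs the same
-- allocation and raises identically there, so Pre_ excludes exactly these crashing inputs.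
def Pre_NgramExtract (sizes : List Int) (NGRAM : Int) : Prop := 0 ≤ NGRAM ∧ NGRAM ≤ 31
instance (sizes : List Int) (NGRAM : Int) : Decidable (Pre_NgramExtract sizes NGRAM) := by
  unfold Pre_NgramExtract; infer_instance

def pvWitness_NgramExtract : List Int × Int := ([1, -1, 1, 1, -1], 2)

def Spec_NgramExtract (sizes : List Int) (NGRAM : Int) (out : List Int) : Prop := out = NgramExtract_alt sizes NGRAM
instance (sizes : List Int) (NGRAM : Int) (out : List Int) : Decidable (Spec_NgramExtract sizes NGRAM out) := by unfold Spec_NgramExtract; infer_instance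

-- ===== CLAIM (what is proved, stated in full; the proofs are below) =====
def Claim_equal_NgramExtract : Prop := ∀ (sizes : List Int) (NGRAM : Int), Dom_NgramExtract sizes NGRAM → Pre_NgramExtract sizes NGRAM → Spec_NgramExtract sizes NGRAM (NgramExtract sizes NGRAM)

-- ===== LEMMAS AND PROOFS =====

-- the bit read from one element
def pvBit (x : Int) : Int := if x = 1 then 1 else 0

-- binary value of a window, read left to right (Horner form)
def pvV (bs : List Int) : Int := bs.foldl (fun a x => a * 2 + pvBit x) 0

lemma pvBit_nonneg (x : Int) : 0 ≤ pvBit x := by unfold pvBit; split <;> omega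
lemma pvBit_le_one (x : Int) : pvBit x ≤ 1 := by unfold pvBit; split <;> omega

lemma pvV_start (bs : List Int) : ∀ a : Int,
    bs.foldl (fun a x => a * 2 + pvBit x) a = a * 2 ^ bs.length + pvV bs := by
  induction bs with
  | nil => intro a; simp [pvV]
  | cons x bs ih =>
    intro a
    simp only [List.foldl_cons, List.length_cons, pvV] at *
    rw [ih (a * 2 + pvBit x), ih (0 * 2 + pvBit x)]
    ring

lemma pvV_cons (x : Int) (bs : List Int) :
    pvV (x :: bs) = pvBit x * 2 ^ bs.length + pvV bs := by
  unfold pvV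
  simp only [List.foldl_cons]
  rw [pvV_start bs (0 * 2 + pvBit x)]
  ring_nf
  rfl

lemma pvV_snoc (bs : List Int) (x : Int) :
    pvV (bs ++ [x]) = pvV bs * 2 + pvBit x := by
  unfold pvV; simp

lemma pvV_bounds (bs : List Int) : 0 ≤ pvV bs ∧ pvV bs < 2 ^ bs.length := by
  induction bs with
  | nil => simp [pvV]
  | cons x bs ih =>
    rw [pvV_cons]
    have h1 := pvBit_nonneg x
    have h2 := pvBit_le_one x
    have hp : (0:Int) < 2 ^ bs.length := by positivity
    constructor
    · nlinarith [ih.1]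
    · have : pvBit x * 2 ^ bs.length ≤ 2 ^ bs.length := by nlinarith
      simp only [List.length_cons, pow_succ]
      nlinarith [ih.2]

-- drop the counter from A's pair-state fold
lemma pvPairFold (g : List Int → Int → List Int) (l : List Int) :
    ∀ (c : Int) (b : List Int),
    (l.foldl (fun (st : Int × List Int) i => (st.1 + 1, g st.2 i)) (c, b)).2 = l.foldl g b := by
  induction l with
  | nil => intro c b; rfl
  | cons x l ih => intro c b; simpa using ih (c + 1) (g b x)

-- A's per-window sum of bit·2^(k-1-t) equals the Horner value of the window
lemma pvSum_eq_V : ∀ (k : Nat) (sample : List Int), k ≤ sample.length →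
    ((List.range k).map (fun t => pvBit (sample.getD t 0) * 2 ^ (k - 1 - t))).sum
      = pvV (sample.take k) := by
  intro k
  induction k with
  | zero => intro sample h; simp [pvV]
  | succ j ih =>
    intro sample h
    match sample with
    | [] => simp at h
    | x :: rest =>
      simp only [List.length_cons, Nat.succ_le_succ_iff] at h
      rw [List.range_succ_eq_map]
      simp only [List.map_cons, List.map_map, List.sum_cons]
      have htail : ((List.range j).map ((fun t => pvBit ((x :: rest).getD t 0) * 2 ^ (j + 1 - 1 - t)) ∘ Nat.succ)).sum
          = ((List.range j).map (fun t => pvBit (rest.getD t 0) * 2 ^ (j - 1 - t))).sum := by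
        congr 1
        apply List.map_congr_left
        intro t ht
        simp only [Function.comp, List.getD_cons_succ]
        congr 2
        omega
      rw [htail, ih rest h]
      rw [List.take_succ_cons, pvV_cons]
      simp [List.length_take, Nat.min_eq_left h]

-- NgramLocator on a window of length ≥ k computes its Horner value
lemma pvLoc_eq_V (k : Nat) (sample : List Int) (hk : k ≤ sample.length) :
    NgramLocator sample (k : Int) = pvV (sample.take k) := by
  unfold NgramLocator
  rw [PySem.List.pyRange_one]
  rw [List.foldl_map]
  simp only [Int.sub_zero, zero_add]
  rw [PySem.List.foldl_add]
  rw [← pvSum_eq_V k sample hk]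
  simp only [zero_add, Int.sub_sub, PySem.List.pyGetD_natCast]
  congr 1
  apply List.map_congr_left
  intro t ht
  simp only [List.mem_range] at ht
  have : ((k:Int) - ((t:Int) + 1)).toNat = k - 1 - t := by omega
  rw [this]
  rfl

-- A's window index at offset j, as a value of the dropped/taken window
lemma pvAwindow (sizes : List Int) (k j : Nat) (h : j + k ≤ sizes.length) :
    NgramLocator (PySem.List.slice sizes (some (j : Int)) (some ((j : Int) + (k : Int)))) (k : Int)
      = pvV ((sizes.drop j).take k) := by
  rw [PySem.List.slice_natCast_add]
  rw [pvLoc_eq_V k _ (by simp [List.length_take, List.length_drop]; omega)]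
  rw [List.take_take, min_self]

-- one sliding step: shift, add the new bit, mod 2^k
lemma pvStep (sizes : List Int) (k i : Nat) (h : i + k < sizes.length) :
    PySem.Int.mod (pvV ((sizes.drop i).take k) * 2 + pvBit (sizes.getD (i + k) 0))
        ((2:Int) ^ k)
      = pvV ((sizes.drop (i + 1)).take k) := by
  cases k with
  | zero =>
    simp [pvV, PySem.Int.mod_eq_emod_of_pos]
  | succ j =>
    have hi : i < sizes.length := by omega
    have hdrop : sizes.drop i = sizes[i] :: sizes.drop (i + 1) := List.drop_eq_getElem_cons hi
    have hjlen : j < (sizes.drop (i + 1)).length := by simp [List.length_drop]; omega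
    have hget : (sizes.drop (i + 1))[j]'hjlen = sizes.getD (i + (j + 1)) 0 := by
      rw [List.getElem_drop]
      rw [List.getD_eq_getElem sizes 0 (by omega)]
      congr 1
      omega
    have htake : (sizes.drop (i + 1)).take (j + 1)
        = (sizes.drop (i + 1)).take j ++ [sizes.getD (i + (j + 1)) 0] := by
      rw [List.take_add_one, List.getElem?_eq_getElem hjlen, hget]
      rfl
    have hmidlen : ((sizes.drop (i + 1)).take j).length = j := by
      simp [List.length_take, List.length_drop]; omega
    rw [hdrop, List.take_succ_cons, pvV_cons, htake, pvV_snoc, hmidlen]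
    set b := pvBit (sizes.getD (i + (j + 1)) 0) with hb
    set m := pvV ((sizes.drop (i + 1)).take j) with hm
    have hbounds := pvV_bounds ((sizes.drop (i + 1)).take j)
    rw [← hm] at hbounds
    rw [hmidlen] at hbounds
    have hbn := pvBit_nonneg (sizes.getD (i + (j + 1)) 0)
    have hb1 := pvBit_le_one (sizes.getD (i + (j + 1)) 0)
    rw [← hb] at hbn hb1
    have hpos : (0:Int) < 2 ^ (j + 1) := by positivity
    rw [PySem.Int.mod_eq_emod_of_pos hpos]
    have hsplit : (pvBit sizes[i] * 2 ^ j + m) * 2 + b = (m * 2 + b) + 2 ^ (j + 1) * pvBit sizes[i] := by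
      ring
    rw [hsplit, Int.add_mul_emod_self_left]
    apply Int.emod_eq_of_lt
    · omega
    · have : (2:Int) ^ (j + 1) = 2 ^ j * 2 := by ring
      omega

-- the first k elements, read through getD over range k, are the take-k prefix
lemma pvMapRange (sizes : List Int) (k : Nat) (hk : k ≤ sizes.length) :
    (List.range k).map (fun t => sizes.getD t 0) = sizes.take k := by
  apply List.ext_getElem
  · simp [hk]
  · intro i h1 h2
    simp only [List.getElem_map, List.getElem_range, List.getElem_take]
    rw [List.getD_eq_getElem sizes 0 (by simp at h1; omega)]

-- B's priming loop computes the Horner value of the first window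
lemma pvIdx0 (sizes : List Int) (k : Nat) (hk : k ≤ sizes.length) :
    (PySem.List.pyRange 0 (k : Int) 1).foldl
      (fun idx j => idx * 2 + (if PySem.List.pyGetD sizes j 0 = 1 then 1 else 0)) 0
      = pvV (sizes.take k) := by
  rw [PySem.List.pyRange_one, List.foldl_map]
  simp only [Int.sub_zero, zero_add, Int.toNat_natCast, PySem.List.pyGetD_natCast]
  have : ∀ (l : List Nat) (a : Int),
      l.foldl (fun idx t => idx * 2 + (if sizes.getD t 0 = 1 then 1 else 0)) a
        = ((l.map (fun t => sizes.getD t 0)).foldl (fun a x => a * 2 + pvBit x) a) := by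
    intro l
    induction l with
    | nil => intro a; rfl
    | cons x l ih => intro a; simp only [List.foldl_cons, List.map_cons]; rw [ih]; rfl
  rw [this, pvMapRange sizes k hk]
  rfl

-- B's sliding loop: invariant (current window value, buckets so far)
lemma pvLoopB (sizes : List Int) (k : Nat) (init : List Int) :
    ∀ (m : Nat), k + m ≤ sizes.length →
    ((PySem.List.pyRange (k : Int) ((k : Int) + (m : Int)) 1).foldl
      (fun (st : Int × List Int) j =>
        let idx := PySem.Int.mod (st.1 * 2 + (if PySem.List.pyGetD sizes j 0 = 1 then 1 else 0)) ((2:Int) ^ k)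
        (idx, pvBump st.2 idx))
      (pvV (sizes.take k), pvBump init (pvV (sizes.take k))))
    = (pvV ((sizes.drop m).take k),
       (List.range (m + 1)).foldl (fun b j => pvBump b (pvV ((sizes.drop j).take k))) init) := by
  intro m
  induction m with
  | zero =>
    intro hm
    simp [List.range_succ]
  | succ m ih =>
    intro hm
    have hcast : (k : Int) + ((m : Nat) + 1 : Nat) = ((k : Int) + (m : Nat)) + 1 := by push_cast; ring
    rw [hcast, PySem.List.pyRange_one_succ_right (by omega), List.foldl_append,
        ih (by omega)]
    simp only [List.foldl_cons, List.foldl_nil]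
    have hidx : PySem.Int.mod
        (pvV ((sizes.drop m).take k) * 2 +
          (if PySem.List.pyGetD sizes ((k:Int) + (m:Int)) 0 = 1 then 1 else 0)) ((2:Int) ^ k)
        = pvV ((sizes.drop (m + 1)).take k) := by
      have : (k : Int) + (m : Int) = ((m + k : Nat) : Int) := by push_cast; ring
      rw [this, PySem.List.pyGetD_natCast]
      have hb : (if sizes.getD (m + k) 0 = 1 then (1:Int) else 0) = pvBit (sizes.getD (m + k) 0) := rfl
      rw [hb]
      exact pvStep sizes k m (by omega)
    simp only [hidx]
    rw [List.range_succ (n := m + 1), List.foldl_append]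
    simp

-- ===== VERDICT (by name: the statement is the Claim_ definition above) =====
theorem NgramExtract_spec : Claim_equal_NgramExtract := by
  intro sizes NGRAM hdom hpre
  unfold Spec_NgramExtract
  obtain ⟨k, rfl⟩ : ∃ k : Nat, NGRAM = (k : Int) :=
    ⟨NGRAM.toNat, (Int.toNat_of_nonneg hpre.1).symm⟩
  unfold NgramExtract NgramExtract_alt
  simp only [Int.toNat_natCast]
  by_cases hnk : (sizes.length : Int) < (k : Int)
  · rw [if_pos hnk]
    rw [PySem.List.pyRange_one_eq_nil (by omega)]
    rfl
  · rw [if_neg hnk]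
    have hk : k ≤ sizes.length := by omega
    -- A side: drop the counter, then rewrite each window through pvAwindow
    rw [pvPairFold (fun b i => pvBump b (NgramLocator (PySem.List.slice sizes (some i) (some (i + (k:Int)))) (k:Int)))]
    rw [PySem.List.pyRange_one, List.foldl_map]
    simp only [Int.sub_zero, zero_add]
    have hm : ((sizes.length : Int) - (k : Int) + 1).toNat = sizes.length - k + 1 := by omega
    rw [hm]
    have hA : List.foldl
        (fun x (y : Nat) => pvBump x (NgramLocator (PySem.List.slice sizes (some (y:Int)) (some ((y:Int) + (k:Int)))) (k:Int)))
        (List.replicate (2 ^ k) 0) (List.range (sizes.length - k + 1))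
      = List.foldl (fun b (t : Nat) => pvBump b (pvV ((sizes.drop t).take k)))
        (List.replicate (2 ^ k) 0) (List.range (sizes.length - k + 1)) := by
      apply PySem.List.foldl_congr_mem
      intro acc t ht
      simp only [List.mem_range] at ht
      rw [pvAwindow sizes k t (by omega)]
    rw [hA]
    -- B side
    rw [pvIdx0 sizes k hk]
    have hn : (sizes.length : Int) = (k : Int) + ((sizes.length - k : Nat) : Int) := by omega
    rw [hn, pvLoopB sizes k _ (sizes.length - k) (by omega)]
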